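-- pv_equiv track=rewrite | github.com/SJ-Kwak/algorithm | 백준/Silver/1388. 바닥 장식/바닥 장식.py | solution
-- ===== SOURCE A (Python) =====
-- def solution(n, m, board):
--     count = 0
--     for i in range(n):
--         for j in range(m):
--             if board[i][j] == '-':
--                 if j == 0 or board[i][j - 1] != '-':
--                     count += 1
--             elif board[i][j] == '|':
--                 if i == 0 or board[i - 1][j] != '|':
--                     count += 1
--     return count
-- ===== SOURCE B (Python) =====
-- def _runs(seq, ch):
--     count = 0
--     prev = None
--     for c in seq:
--         if c == ch and prev != ch:
--             count += 1
--         prev = c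
--     return count
--
--
-- def solution(n, m, board):
--     if n <= 0 or m <= 0:
--         return 0
--     total = 0
--     for i in range(n):
--         total += _runs((board[i][j] for j in range(m)), '-')
--     for j in range(m):
--         total += _runs((board[i][j] for i in range(n)), '|')
--     return total
-- ===== Notes on version B (the rewrite author's own statement) =====
-- stated objective: alternative
-- what changed: Replaces A's single reading-order pass with per-cell lookback at board[i][j-1]/board[i-1][j] by two separate passes that count maximal runs with a previous-character accumulator: a row-major pass for '-' runs and a transposed column-major pass for '|' runs.
import Mathlib
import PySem

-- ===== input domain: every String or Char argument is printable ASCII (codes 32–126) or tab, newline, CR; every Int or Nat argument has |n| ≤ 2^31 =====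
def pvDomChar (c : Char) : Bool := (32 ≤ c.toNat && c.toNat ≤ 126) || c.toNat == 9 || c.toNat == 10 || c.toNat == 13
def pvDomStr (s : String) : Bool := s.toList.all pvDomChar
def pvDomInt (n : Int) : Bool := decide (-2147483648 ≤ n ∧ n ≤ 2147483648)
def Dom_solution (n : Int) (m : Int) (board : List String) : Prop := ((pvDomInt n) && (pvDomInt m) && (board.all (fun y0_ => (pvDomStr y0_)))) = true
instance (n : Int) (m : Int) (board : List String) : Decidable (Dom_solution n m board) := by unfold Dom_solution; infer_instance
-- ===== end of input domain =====

-- B counts maximal runs in two separate passes (row-major '-' runs, then column-major '|' runs)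
-- with previous-character state instead of A's per-cell lookback; objective: alternative decomposition.

-- board[i][j] as a total function; the default is never reached on inputs satisfying Pre_solution
def pvCell (board : List String) (i j : Int) : Char :=
  ((PySem.List.pyGet? board i).bind (fun s => PySem.Str.pyGet? s j)).getD ' '

-- ===== PORT A =====
def solution (n : Int) (m : Int) (board : List String) : Int :=
  (PySem.List.pyRange 0 n).foldl (fun count i =>
    (PySem.List.pyRange 0 m).foldl (fun count j =>
      if pvCell board i j = '-' then
        (if j = 0 ∨ pvCell board i (j - 1) ≠ '-' then count + 1 else count)
      else if pvCell board i j = '|' then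
        (if i = 0 ∨ pvCell board (i - 1) j ≠ '|' then count + 1 else count)
      else count) count) 0

-- ===== PORT B =====
-- _runs(seq, ch): count of maximal runs of ch, tracking the previous character
def pvRuns (ch : Char) (seq : List Char) : Int :=
  (seq.foldl (fun (st : Int × Option Char) c =>
      (st.1 + (if c = ch ∧ st.2 ≠ some ch then 1 else 0), some c))
    ((0 : Int), (none : Option Char))).1

def solution_alt (n : Int) (m : Int) (board : List String) : Int :=
  if n ≤ 0 ∨ m ≤ 0 then 0 else
  let horiz := (PySem.List.pyRange 0 n).foldl (fun t i =>
    t + pvRuns '-' ((PySem.List.pyRange 0 m).map (fun j => pvCell board i j))) 0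
  (PySem.List.pyRange 0 m).foldl (fun t j =>
    t + pvRuns '|' ((PySem.List.pyRange 0 n).map (fun i => pvCell board i j))) horiz

-- ===== PRECONDITION & SPEC =====
-- Pre_: exactly the inputs where Python A returns (it raises IndexError iff n,m > 0 and
-- the board has fewer than n rows or one of the first n rows has fewer than m characters).
def Pre_solution (n : Int) (m : Int) (board : List String) : Prop :=
  m ≤ 0 ∨ n ≤ 0 ∨ (n ≤ (board.length : Int) ∧ ∀ s ∈ board.take n.toNat, m ≤ (s.toList.length : Int))
instance (n : Int) (m : Int) (board : List String) : Decidable (Pre_solution n m board) := by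
  unfold Pre_solution; infer_instance

def pvWitness_solution : Int × Int × List String := (2, 3, ["--|", "|-|"])

def Spec_solution (n : Int) (m : Int) (board : List String) (out : Int) : Prop := out = solution_alt n m board
instance (n : Int) (m : Int) (board : List String) (out : Int) : Decidable (Spec_solution n m board out) := by unfold Spec_solution; infer_instance

-- ===== CLAIM (what is proved, stated in full; the proofs are below) =====
def Claim_equal_solution : Prop := ∀ (n : Int) (m : Int) (board : List String), Dom_solution n m board → Pre_solution n m board → Spec_solution n m board (solution n m board)

-- ===== LEMMAS AND PROOFS =====

-- Int-indexed run-start indicators (one per orientation); A's per-cell branch adds both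
def pvHInt (board : List String) (i j : Int) : Int :=
  if pvCell board i j = '-' ∧ (j = 0 ∨ pvCell board i (j - 1) ≠ '-') then 1 else 0

def pvVInt (board : List String) (i j : Int) : Int :=
  if pvCell board i j = '|' ∧ (i = 0 ∨ pvCell board (i - 1) j ≠ '|') then 1 else 0

-- prefix-run counter: pvRuns's fold with an explicit previous character
def pvCS (ch : Char) : Option Char → List Char → Int
  | _, [] => 0
  | prev, c :: cs => (if c = ch ∧ prev ≠ some ch then 1 else 0) + pvCS ch (some c) cs

lemma pvRange_eq (x : Int) :
    PySem.List.pyRange 0 x = (List.range x.toNat).map (fun (k : Nat) => (k : Int)) := by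
  by_cases h : 0 ≤ x
  · have hx : x = (x.toNat : Int) := by omega
    conv_lhs => rw [hx, PySem.List.pyRange_zero_natCast]
  · have h0 : x.toNat = 0 := by omega
    rw [h0]
    simp only [List.range_zero, List.map_nil]
    simp [PySem.List.pyRange]
    omega

lemma foldl_body_add {α : Type} (l : List α) (F : Int → α → Int) (g : α → Int)
    (h : ∀ c x, F c x = c + g x) (c0 : Int) :
    l.foldl F c0 = c0 + (l.map g).sum := by
  have hF : F = fun c x => c + g x := by funext c x; exact h c x
  rw [hF, PySem.List.foldl_add]

lemma pvRuns_foldl (ch : Char) (l : List Char) :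
    ∀ (acc : Int) (prev : Option Char),
      (l.foldl (fun (st : Int × Option Char) c =>
        (st.1 + (if c = ch ∧ st.2 ≠ some ch then 1 else 0), some c)) (acc, prev)).1
      = acc + pvCS ch prev l := by
  induction l with
  | nil => intro acc prev; simp [pvCS]
  | cons c cs ih =>
    intro acc prev
    simp only [List.foldl_cons, pvCS, ih]
    ring

lemma pvRuns_eq_pvCS (ch : Char) (l : List Char) : pvRuns ch l = pvCS ch none l := by
  have := pvRuns_foldl ch l 0 none
  simpa [pvRuns] using this

lemma pvCS_append_singleton (ch : Char) (l : List Char) :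
    ∀ (prev : Option Char) (c : Char),
      pvCS ch prev (l ++ [c])
      = pvCS ch prev l + (if c = ch ∧ (l.getLast?.or prev) ≠ some ch then 1 else 0) := by
  induction l with
  | nil => intro prev c; simp [pvCS]
  | cons x xs ih =>
    intro prev c
    have hlast : (x :: xs).getLast?.or prev = xs.getLast?.or (some x) := by
      cases xs with
      | nil => simp
      | cons y ys =>
        rw [List.getLast?_cons_cons]
        rcases h : (y :: ys).getLast? with _ | z
        · simp at h
        · simp
    simp only [List.cons_append, pvCS, ih, hlast]
    ring

lemma pvRuns_map_range (ch : Char) (f : Nat → Char) :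
    ∀ (N : Nat),
      pvRuns ch ((List.range N).map f)
      = ((List.range N).map (fun k =>
          if f k = ch ∧ (k = 0 ∨ f (k - 1) ≠ ch) then (1 : Int) else 0)).sum := by
  intro N
  induction N with
  | zero => simp [pvRuns]
  | succ N ih =>
    rw [List.range_succ, List.map_append, List.map_append]
    simp only [List.map_cons, List.map_nil]
    rw [pvRuns_eq_pvCS] at ih ⊢
    rw [pvCS_append_singleton, ih, List.sum_append]
    congr 1
    simp only [List.sum_cons, List.sum_nil, add_zero]
    have hl : ((List.range N).map f).getLast?.or none
        = if N = 0 then none else some (f (N - 1)) := by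
      rw [List.getLast?_map, List.getLast?_range]
      cases N <;> simp
    rw [hl]
    rcases Nat.eq_zero_or_pos N with h0 | hpos
    · subst h0; simp
    · have hN : N ≠ 0 := Nat.pos_iff_ne_zero.mp hpos
      simp [hN]

-- A's per-cell branch equals adding both run-start indicators (they are mutually exclusive)
lemma pvCell_branch (board : List String) (i j : Int) (c : Int) :
    (if pvCell board i j = '-' then
        (if j = 0 ∨ pvCell board i (j - 1) ≠ '-' then c + 1 else c)
      else if pvCell board i j = '|' then
        (if i = 0 ∨ pvCell board (i - 1) j ≠ '|' then c + 1 else c)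
      else c)
    = c + (pvHInt board i j + pvVInt board i j) := by
  unfold pvHInt pvVInt
  split_ifs <;> simp_all

-- the run-start indicator along a row is the '-' indicator of A
lemma pvH_cast (board : List String) (i : Int) (k : Nat) :
    (if pvCell board i (k : Int) = '-' ∧ (k = 0 ∨ pvCell board i ((k - 1 : Nat) : Int) ≠ '-')
      then (1 : Int) else 0) = pvHInt board i (k : Int) := by
  unfold pvHInt
  by_cases hk : k = 0
  · subst hk; simp
  · have h1 : ((k : Int)) - 1 = ((k - 1 : Nat) : Int) := by omega
    have h2 : ¬ ((k : Int) = 0) := by omega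
    rw [h1]
    simp [hk]

-- the run-start indicator along a column is the '|' indicator of A
lemma pvV_cast (board : List String) (j : Int) (k : Nat) :
    (if pvCell board (k : Int) j = '|' ∧ (k = 0 ∨ pvCell board ((k - 1 : Nat) : Int) j ≠ '|')
      then (1 : Int) else 0) = pvVInt board (k : Int) j := by
  unfold pvVInt
  by_cases hk : k = 0
  · subst hk; simp
  · have h1 : ((k : Int)) - 1 = ((k - 1 : Nat) : Int) := by omega
    have h2 : ¬ ((k : Int) = 0) := by omega
    rw [h1]
    simp [hk]

-- characterisation of port A as a double sum of indicators
lemma solution_eq_sum (n m : Int) (board : List String) :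
    solution n m board
    = ((List.range n.toNat).map (fun (i : Nat) =>
        ((List.range m.toNat).map (fun (j : Nat) =>
          pvHInt board (i : Int) (j : Int) + pvVInt board (i : Int) (j : Int))).sum)).sum := by
  unfold solution
  rw [pvRange_eq n, pvRange_eq m]
  rw [List.foldl_map]
  refine (foldl_body_add _ _ _ (fun c i => ?_) 0).trans (zero_add _)
  rw [List.foldl_map]
  exact foldl_body_add _ _ _ (fun c' (j : Nat) => pvCell_branch board (i : Int) (j : Int) c') c

-- characterisation of port B as row-run sums plus column-run sums
lemma solution_alt_eq_sum (n m : Int) (board : List String)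
    (h : ¬ (n ≤ 0 ∨ m ≤ 0)) :
    solution_alt n m board
    = ((List.range n.toNat).map (fun (i : Nat) =>
        ((List.range m.toNat).map (fun (j : Nat) => pvHInt board (i : Int) (j : Int))).sum)).sum
      + ((List.range m.toNat).map (fun (j : Nat) =>
        ((List.range n.toNat).map (fun (i : Nat) => pvVInt board (i : Int) (j : Int))).sum)).sum := by
  unfold solution_alt
  rw [if_neg h]
  rw [pvRange_eq n, pvRange_eq m]
  simp only [List.foldl_map, List.map_map, Function.comp_def]
  have hminus : ∀ (c0 : Int),
      (List.range n.toNat).foldl (fun x (y : Nat) =>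
        x + pvRuns '-' (List.map (fun (k : Nat) => pvCell board (y : Int) (k : Int))
          (List.range m.toNat))) c0
      = c0 + ((List.range n.toNat).map (fun (y : Nat) =>
          pvRuns '-' (List.map (fun (k : Nat) => pvCell board (y : Int) (k : Int))
            (List.range m.toNat)))).sum :=
    fun c0 => foldl_body_add _ _ _ (fun _ _ => rfl) c0
  have hpipe : ∀ (c0 : Int),
      (List.range m.toNat).foldl (fun x (y : Nat) =>
        x + pvRuns '|' (List.map (fun (k : Nat) => pvCell board (k : Int) (y : Int))
          (List.range n.toNat))) c0
      = c0 + ((List.range m.toNat).map (fun (y : Nat) =>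
          pvRuns '|' (List.map (fun (k : Nat) => pvCell board (k : Int) (y : Int))
            (List.range n.toNat)))).sum :=
    fun c0 => foldl_body_add _ _ _ (fun _ _ => rfl) c0
  rw [hminus, hpipe, zero_add]
  congr 1
  · apply congrArg
    apply List.map_congr_left
    intro i _
    rw [pvRuns_map_range '-' (fun j => pvCell board (i : Int) (j : Int))]
    apply congrArg
    exact List.map_congr_left (fun j _ => pvH_cast board (i : Int) j)
  · apply congrArg
    apply List.map_congr_left
    intro j _
    rw [pvRuns_map_range '|' (fun i => pvCell board (i : Int) (j : Int))]
    apply congrArg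
    exact List.map_congr_left (fun i _ => pvV_cast board (j : Int) i)

-- ===== VERDICT (by name: the statement is the Claim_ definition above) =====
theorem solution_spec : Claim_equal_solution := by
  intro n m board _ _
  unfold Spec_solution
  by_cases h : n ≤ 0 ∨ m ≤ 0
  · have hz : solution_alt n m board = 0 := by unfold solution_alt; rw [if_pos h]
    rw [hz, solution_eq_sum]
    rcases h with h | h
    · have hn : n.toNat = 0 := by omega
      rw [hn]; simp
    · have hm : m.toNat = 0 := by omega
      rw [hm]; simp
  rw [solution_eq_sum, solution_alt_eq_sum n m board h]
  have hsplit : ((List.range n.toNat).map (fun (i : Nat) =>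
      ((List.range m.toNat).map (fun (j : Nat) =>
        pvHInt board (i : Int) (j : Int) + pvVInt board (i : Int) (j : Int))).sum)).sum
      = ((List.range n.toNat).map (fun (i : Nat) =>
          ((List.range m.toNat).map (fun (j : Nat) => pvHInt board (i : Int) (j : Int))).sum)).sum
        + ((List.range n.toNat).map (fun (i : Nat) =>
          ((List.range m.toNat).map (fun (j : Nat) => pvVInt board (i : Int) (j : Int))).sum)).sum := by
    rw [← PySem.List.sum_map_add_int]
    apply congrArg
    exact List.map_congr_left (fun i _ => PySem.List.sum_map_add_int _ _ _)
  rw [hsplit]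
  congr 1
  show (∑ i ∈ Finset.range n.toNat, ∑ j ∈ Finset.range m.toNat, pvVInt board (i : Int) (j : Int))
      = ∑ j ∈ Finset.range m.toNat, ∑ i ∈ Finset.range n.toNat, pvVInt board (i : Int) (j : Int)
  exact Finset.sum_comm
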